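-- pv_equiv track=rewrite | github.com/pypi-data/pypi-mirror-350 | packages/mfbatch/mfbatch-0.5.2.tar.gz/mfbatch-0.5.2/mfbatch/metaflac.py | sanatize_key
-- ===== SOURCE A (Python) =====
-- def sanatize_key(k: str) -> str:
--     """
--     Enforces the VORBIS_COMMENT spec with regard to keys
--     """
--     k = k.upper()
--     rval = ''
--     for c in k:
--         v = ord(c)
--         if 0x20 <= v <= 0x7D and v != 0x3D:
--             rval = rval + c
--         else:
--             rval = rval + '_'
--
--     return rval
-- ===== SOURCE B (Python) =====
-- import re
--
-- _BAD = re.compile(r'[^\x20-\x7D]|=')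
--
-- def sanatize_key(k: str) -> str:
--     """
--     Enforces the VORBIS_COMMENT spec with regard to keys
--     """
--     return _BAD.sub('_', k.upper())
-- ===== Notes on version B (the rewrite author's own statement) =====
-- stated objective: faster
-- what changed: Replaced the explicit per-character loop with quadratic string concatenation by a single precompiled re.sub that maps every disallowed character (outside 0x20-0x7D, or the equals sign) to an underscore.
import Mathlib
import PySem

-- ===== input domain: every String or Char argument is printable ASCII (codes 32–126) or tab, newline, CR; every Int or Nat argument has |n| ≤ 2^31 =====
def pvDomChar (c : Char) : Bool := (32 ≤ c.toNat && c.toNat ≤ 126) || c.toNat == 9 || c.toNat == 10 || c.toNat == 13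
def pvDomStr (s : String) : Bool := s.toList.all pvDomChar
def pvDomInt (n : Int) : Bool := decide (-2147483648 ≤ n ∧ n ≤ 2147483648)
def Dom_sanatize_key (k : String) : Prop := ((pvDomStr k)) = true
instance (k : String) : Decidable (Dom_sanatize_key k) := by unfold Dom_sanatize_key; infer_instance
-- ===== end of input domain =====

-- B replaces A's per-character loop with a single regex substitution (idiomatic; return value only).
-- ===== PORT A =====
def sanatize_key (k : String) : String :=
  ((PySem.Str.upper k).toList.foldl (fun rval c =>
    let v : Int := (c.toNat : Int)
    if 0x20 ≤ v ∧ v ≤ 0x7D ∧ v ≠ 0x3D then rval ++ [c] else rval ++ ['_']) []) |> String.ofList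

-- ===== PORT B =====
-- Source B's re.sub matches single characters only, so the substitution is exactly a
-- character-wise map: each char matching [^\x20-\x7D]|= becomes '_'.
def pvBadChar (c : Char) : Bool := c.toNat < 0x20 || 0x7D < c.toNat || c.toNat == 0x3D
def sanatize_key_alt (k : String) : String :=
  ((PySem.Str.upper k).toList.map (fun c => if pvBadChar c then '_' else c)) |> String.ofList

-- ===== PRECONDITION & SPEC =====
def Spec_sanatize_key (k : String) (out : String) : Prop := out = sanatize_key_alt k
instance (k : String) (out : String) : Decidable (Spec_sanatize_key k out) := by unfold Spec_sanatize_key; infer_instance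

-- ===== CLAIM (what is proved, stated in full; the proofs are below) =====
def Claim_equal_sanatize_key : Prop := ∀ (k : String), Dom_sanatize_key k → Spec_sanatize_key k (sanatize_key k)

-- ===== LEMMAS AND PROOFS =====

-- ===== VERDICT (by name: the statement is the Claim_ definition above) =====
theorem pvFoldl_map (l : List Char) (acc : List Char) :
    l.foldl (fun rval c =>
      let v : Int := (c.toNat : Int)
      if 0x20 ≤ v ∧ v ≤ 0x7D ∧ v ≠ 0x3D then rval ++ [c] else rval ++ ['_']) acc
    = acc ++ l.map (fun c => if pvBadChar c then '_' else c) := by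
  induction l generalizing acc with
  | nil => simp
  | cons c t ih =>
    simp only [List.foldl_cons, List.map_cons, ih]
    have hb : pvBadChar c = true ↔ ¬ ((0x20 : Int) ≤ (c.toNat : Int) ∧ (c.toNat : Int) ≤ 0x7D ∧ (c.toNat : Int) ≠ 0x3D) := by
      simp [pvBadChar]; omega
    by_cases h : (0x20 : Int) ≤ (c.toNat : Int) ∧ (c.toNat : Int) ≤ 0x7D ∧ (c.toNat : Int) ≠ 0x3D
    · rw [if_pos h, if_neg (by simp [hb, h])]; simp
    · rw [if_neg h, if_pos (hb.mpr h)]; simp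

theorem sanatize_key_spec : Claim_equal_sanatize_key := by
  intro k _
  unfold Spec_sanatize_key sanatize_key sanatize_key_alt
  rw [pvFoldl_map]
  rfl
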